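-- pv_equiv track=rewrite | github.com/enzojunq/AcademiaPython-Insper | 06.Lista/peso_3/define_vencedores.py | define_vencedores
-- ===== SOURCE A (Python) =====
-- def define_vencedores(sorteados,cartelas):
--
--     pontuacao={}
--     resultado=[]
--     for numero in sorteados:
--         for jogador,lista in cartelas.items():
--             for numero_sorteado in lista:
--                 if numero_sorteado == numero:
--                     if jogador not in pontuacao:
--                         pontuacao[jogador]=1
--                     else:
--                         pontuacao[jogador]+=1
--
--     if pontuacao == {}:
--         for nome in cartelas:
--             resultado.append(nome)
--         return resultado
--     else:
--         maximo=max(pontuacao.values())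
--         for nome,pontos in pontuacao.items():
--             if pontos == maximo:
--                 resultado.append(nome)
--
--         return resultado
-- ===== SOURCE B (Python) =====
-- def define_vencedores(sorteados, cartelas):
--     # inverted index: drawn-number -> holders, one entry per occurrence, in card order
--     pares = [(numero, jogador) for jogador, lista in cartelas.items() for numero in lista]
--     indice = {}
--     for numero, jogador in pares:
--         indice.setdefault(numero, []).append(jogador)
--     pontuacao = {}
--     for numero in sorteados:
--         for jogador in indice.get(numero, []):
--             pontuacao[jogador] = pontuacao.get(jogador, 0) + 1
--     if not pontuacao:
--         return [nome for nome in cartelas]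
--     maximo = max(pontuacao.values())
--     return [nome for nome, pontos in pontuacao.items() if pontos == maximo]
-- ===== Notes on version B (the rewrite author's own statement) =====
-- stated objective: faster
-- what changed: B builds an inverted index (number -> holders per occurrence, in card order) once and then scores each drawn number by a direct index lookup, instead of A's triple nested rescan of every card for every drawn number.
import Mathlib
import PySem

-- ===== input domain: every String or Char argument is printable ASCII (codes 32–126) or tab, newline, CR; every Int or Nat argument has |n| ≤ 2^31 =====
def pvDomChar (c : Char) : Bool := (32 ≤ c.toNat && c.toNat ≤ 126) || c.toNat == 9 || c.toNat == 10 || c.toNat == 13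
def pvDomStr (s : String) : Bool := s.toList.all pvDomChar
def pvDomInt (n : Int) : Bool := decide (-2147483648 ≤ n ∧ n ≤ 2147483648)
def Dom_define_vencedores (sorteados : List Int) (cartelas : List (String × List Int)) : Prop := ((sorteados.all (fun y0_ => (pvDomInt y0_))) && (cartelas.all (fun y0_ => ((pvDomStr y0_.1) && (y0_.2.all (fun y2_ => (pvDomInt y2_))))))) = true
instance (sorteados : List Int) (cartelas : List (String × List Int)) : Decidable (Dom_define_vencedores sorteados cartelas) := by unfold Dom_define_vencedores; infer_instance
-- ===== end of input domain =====

-- B replaces A's triple nested scan by an inverted index (number -> holders), making the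
-- scoring pass O(|sorteados| + hits) instead of rescanning every card per drawn number.

-- ===== PORT A =====
-- A's scoring loop, extracted verbatim as a named helper
def pvPontA (sorteados : List Int) (cartelas : List (String × List Int)) : PySem.Dict String Int :=
  sorteados.foldl (fun pont numero =>
    cartelas.foldl (fun pont jl =>
      jl.2.foldl (fun pont ns =>
        if ns == numero then
          if pont.contains jl.1 = false then
            pont.insert jl.1 1
          else
            -- pontuacao[jogador] += 1 (the key is present, so get(j,0) is pontuacao[jogador])
            pont.modify jl.1 0 (· + 1)
        else pont) pont) pont) PySem.Dict.empty

def define_vencedores (sorteados : List Int) (cartelas : List (String × List Int)) : List String :=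
  let pontuacao := pvPontA sorteados cartelas
  if pontuacao.items = [] then
    cartelas.foldl (fun res jl => res ++ [jl.1]) []
  else
    match PySem.List.max? pontuacao.values (fun v => v) with
    | none => []   -- unreachable: pontuacao is nonempty in this branch
    | some maximo =>
      pontuacao.items.foldl (fun res p => if p.2 == maximo then res ++ [p.1] else res) []

-- ===== PORT B =====
-- B's inverted index and its index-driven scoring loop, as named helpers
def pvIndiceB (cartelas : List (String × List Int)) : PySem.Dict Int (List String) :=
  (cartelas.flatMap (fun jl => jl.2.map (fun n => (n, jl.1)))).foldl
    (fun d p => d.modify p.1 [] (· ++ [p.2])) PySem.Dict.empty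

def pvPontB (sorteados : List Int) (cartelas : List (String × List Int)) : PySem.Dict String Int :=
  sorteados.foldl (fun pont numero =>
    ((pvIndiceB cartelas).getD numero []).foldl
      (fun pont jogador => pont.modify jogador 0 (· + 1)) pont) PySem.Dict.empty

def define_vencedores_alt (sorteados : List Int) (cartelas : List (String × List Int)) : List String :=
  let pontuacao := pvPontB sorteados cartelas
  if pontuacao.items = [] then
    cartelas.map (fun jl => jl.1)
  else
    match PySem.List.max? pontuacao.values (fun v => v) with
    | none => []
    | some maximo => (pontuacao.items.filter (fun p => p.2 == maximo)).map (fun p => p.1)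

-- ===== PRECONDITION & SPEC =====
def Spec_define_vencedores (sorteados : List Int) (cartelas : List (String × List Int)) (out : List String) : Prop := out = define_vencedores_alt sorteados cartelas
instance (sorteados : List Int) (cartelas : List (String × List Int)) (out : List String) : Decidable (Spec_define_vencedores sorteados cartelas out) := by unfold Spec_define_vencedores; infer_instance

-- ===== CLAIM (what is proved, stated in full; the proofs are below) =====
def Claim_equal_define_vencedores : Prop := ∀ (sorteados : List Int) (cartelas : List (String × List Int)), Dom_define_vencedores sorteados cartelas → Spec_define_vencedores sorteados cartelas (define_vencedores sorteados cartelas)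

-- ===== LEMMAS AND PROOFS =====

-- the score increment both loops perform
def pvIncr (d : PySem.Dict String Int) (j : String) : PySem.Dict String Int := d.modify j 0 (· + 1)

-- for a fixed drawn number, the holders it scores, in card order with multiplicity
def pvOcc (cartelas : List (String × List Int)) (num : Int) : List String :=
  cartelas.flatMap (fun jl => (jl.2.filter (fun n => n == num)).map (fun _ => jl.1))

theorem pvStep_eq (d : PySem.Dict String Int) (j : String) :
    (if d.contains j = false then d.insert j 1 else d.modify j 0 (· + 1)) = pvIncr d j := by
  by_cases h : d.contains j = false
  · rw [if_pos h]
    simp [pvIncr, PySem.Dict.modify, PySem.Dict.getD_of_not_contains d 0 h]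
  · rw [if_neg h]; rfl

theorem pvInner_eq (l : List Int) (j : String) (num : Int) (d : PySem.Dict String Int) :
    l.foldl (fun d ns => if ns == num then pvIncr d j else d) d
      = ((l.filter (fun n => n == num)).map (fun _ => j)).foldl pvIncr d := by
  induction l generalizing d with
  | nil => rfl
  | cons x t ih =>
    rw [List.foldl_cons, List.filter_cons]
    by_cases h : (x == num) = true
    · rw [if_pos h, if_pos h, List.map_cons, List.foldl_cons, ih]
    · rw [if_neg h, if_neg h, ih]

theorem pvMid_eq (cartelas : List (String × List Int)) (num : Int) (d : PySem.Dict String Int) :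
    cartelas.foldl (fun d jl => jl.2.foldl (fun d ns => if ns == num then pvIncr d jl.1 else d) d) d
      = (pvOcc cartelas num).foldl pvIncr d := by
  induction cartelas generalizing d with
  | nil => rfl
  | cons c t ih =>
    rw [List.foldl_cons, ih, pvInner_eq]
    simp only [pvOcc, List.flatMap_cons, List.foldl_append]

theorem pvIndex_eq (cartelas : List (String × List Int)) (num : Int) :
    (pvIndiceB cartelas).getD num [] = pvOcc cartelas num := by
  unfold pvIndiceB
  rw [PySem.Dict.getD_foldl_modify_append]
  simp only [PySem.Dict.getD_empty, List.nil_append]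
  induction cartelas with
  | nil => rfl
  | cons c t ih =>
    simp only [pvOcc, List.flatMap_cons, List.filter_append, List.map_append] at *
    rw [ih]
    congr 1
    simp [List.filter_map, List.map_map, Function.comp_def]

theorem pvPont_eq (sorteados : List Int) (cartelas : List (String × List Int)) :
    pvPontA sorteados cartelas = pvPontB sorteados cartelas := by
  unfold pvPontA pvPontB
  apply PySem.List.foldl_congr_mem
  intro d num _
  calc cartelas.foldl (fun pont jl =>
          jl.2.foldl (fun pont ns =>
            if ns == num then
              if pont.contains jl.1 = false then pont.insert jl.1 1
              else pont.modify jl.1 0 (· + 1)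
            else pont) pont) d
      = cartelas.foldl (fun pont jl =>
          jl.2.foldl (fun pont ns => if ns == num then pvIncr pont jl.1 else pont) pont) d := by
        simp only [pvStep_eq]
    _ = (pvOcc cartelas num).foldl pvIncr d := pvMid_eq cartelas num d
    _ = _ := by rw [← pvIndex_eq]; rfl

theorem define_vencedores_eq (sorteados : List Int) (cartelas : List (String × List Int)) :
    define_vencedores sorteados cartelas = define_vencedores_alt sorteados cartelas := by
  unfold define_vencedores define_vencedores_alt
  rw [pvPont_eq]
  by_cases h : (pvPontB sorteados cartelas).items = []
  · rw [if_pos h, if_pos h, PySem.List.foldl_append_singleton_eq_map, List.nil_append]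
  · rw [if_neg h, if_neg h]
    cases PySem.List.max? (pvPontB sorteados cartelas).values (fun v => v) with
    | none => rfl
    | some m =>
      dsimp only
      rw [PySem.List.foldl_append_if (fun p : String × Int => p.2 == m) (fun p => p.1),
        List.nil_append]

-- ===== VERDICT (by name: the statement is the Claim_ definition above) =====
theorem define_vencedores_spec : Claim_equal_define_vencedores := by
  intro s c _
  exact define_vencedores_eq s c
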